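-- pv_equiv track=rewrite | github.com/danielecuomo/GaugeModelSimulation | gauge_simulation/core.py | get_nearest_neighbor_interactions
-- ===== SOURCE A (Python) =====
-- def get_nearest_neighbor_interactions(lattice_size: list[int]) -> list[tuple[int, int]]:
--     """
--     Generate nearest-neighbor interactions pairs for 1D chains or 2D rectangular lattices.
--
--     Args:
--         lattice_size (list[int]): A list containing [rows, cols].
--                                   Example: [1, 5] or [5,1] for 1D, [4, 5] for 2D.
--
--     Returns:
--         list[tuple[int,int]]: list of (i,j) index pairs for nearest-neighbor couplings.
--     """
--     # Validate input
--     if not (isinstance(lattice_size, list) and len(lattice_size) == 2):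
--         raise ValueError("lattice_size must be a list of two integers [rows, cols].")
--
--     rows, cols = lattice_size
--
--     if not (isinstance(rows, int) and isinstance(cols, int) and rows > 0 and cols > 0):
--         raise ValueError("Both rows and cols must be positive integers.")
--
--     num_qubits = rows * cols
--     interactions = []
--
--     # Get dimension and calculate interactions
--     # Check for 1D (linear chain)
--     if rows == 1 or cols == 1:
--
--         interactions = [(i, i + 1) for i in range(num_qubits - 1)]
--
--     # Check for 2D (full rectangular lattice)
--     else:
--         for i in range(num_qubits):
--             # right neighbor
--             if (i + 1) % cols != 0:
--                 interactions.append((i, i + 1))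
--
--             # down neighbor
--             if i + cols < num_qubits:
--                 interactions.append((i, i + cols))
--
--     return interactions
-- ===== SOURCE B (Python) =====
-- def get_nearest_neighbor_interactions(lattice_size: list[int]) -> list[tuple[int, int]]:
--     # Validate input (same conditions as the original)
--     if not (isinstance(lattice_size, list) and len(lattice_size) == 2):
--         raise ValueError("lattice_size must be a list of two integers [rows, cols].")
--
--     rows, cols = lattice_size
--
--     if not (isinstance(rows, int) and isinstance(cols, int) and rows > 0 and cols > 0):
--         raise ValueError("Both rows and cols must be positive integers.")
--
--     n = rows * cols
--
--     # Stage 1: all horizontal (right-neighbor) edges, row by row.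
--     horizontal = [(r * cols + c, r * cols + c + 1)
--                   for r in range(rows) for c in range(cols - 1)]
--
--     # Stage 2: all vertical (down-neighbor) edges: every site outside the last row.
--     vertical = [(i, i + cols) for i in range(n - cols)]
--
--     # Merge the two staged lists into lexicographic (i, j) order; since every
--     # endpoint j is < n, the integer key i*n + j IS the lexicographic order,
--     # and it puts each right edge just before the down edge of the same site.
--     return sorted(horizontal + vertical, key=lambda p: p[0] * n + p[1])
-- ===== Notes on version B (the rewrite author's own statement) =====
-- stated objective: alternative
-- what changed: Instead of A's per-cell emission (a 1D special-case comprehension plus a flat-index loop that interleaves right/down appends under modular tests), B generates the horizontal and vertical edge lists in two independent staged comprehensions and then merges them into the required order with a single lexicographic sort.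
import Mathlib
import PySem

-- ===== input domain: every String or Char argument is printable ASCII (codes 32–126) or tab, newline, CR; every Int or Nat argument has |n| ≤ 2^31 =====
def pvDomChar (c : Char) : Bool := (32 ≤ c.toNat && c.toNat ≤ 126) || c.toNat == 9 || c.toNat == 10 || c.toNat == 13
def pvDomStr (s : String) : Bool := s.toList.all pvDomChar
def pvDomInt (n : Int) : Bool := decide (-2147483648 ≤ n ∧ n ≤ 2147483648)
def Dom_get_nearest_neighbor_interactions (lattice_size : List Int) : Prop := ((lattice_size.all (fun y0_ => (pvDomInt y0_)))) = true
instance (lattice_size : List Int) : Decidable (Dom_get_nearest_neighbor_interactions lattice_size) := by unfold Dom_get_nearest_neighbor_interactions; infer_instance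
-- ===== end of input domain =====

-- B replaces A's per-cell interleaved emission (1D comprehension branch + flat-index loop
-- with modular tests) by two independent staged edge lists merged by one lexicographic sort
-- (objective: alternative algorithm, same validated behaviour).

-- ===== PORT A =====
-- Port of A: validate, then either the 1D comprehension or the flat-index loop with '%'.
def get_nearest_neighbor_interactions (lattice_size : List Int) : List (Int × Int) :=
  match lattice_size with
  | [rows, cols] =>
    let num_qubits := rows * cols
    if rows = 1 ∨ cols = 1 then
      (PySem.List.pyRange 0 (num_qubits - 1)).map (fun i => (i, i + 1))
    else
      (PySem.List.pyRange 0 num_qubits).foldl (fun interactions i =>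
        let interactions :=
          if PySem.Int.mod (i + 1) cols ≠ 0 then interactions ++ [(i, i + 1)] else interactions
        if i + cols < num_qubits then interactions ++ [(i, i + cols)] else interactions) []
  | _ => []  -- ValueError in Python: excluded by Pre_

-- ===== PORT B =====
-- Port of B: two staged comprehensions (horizontal edges, vertical edges), then one
-- stable sort by the integer key i*n + j (lexicographic (i, j) order since j < n).
def get_nearest_neighbor_interactions_alt (lattice_size : List Int) : List (Int × Int) :=
  if lattice_size.length = 2 then
    let rows := lattice_size.getD 0 0   -- 'rows, cols = lattice_size' after the len == 2 check
    let cols := lattice_size.getD 1 0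
    let n := rows * cols
    let horizontal := (PySem.List.pyRange 0 rows).flatMap (fun r =>
      (PySem.List.pyRange 0 (cols - 1)).map (fun c => (r * cols + c, r * cols + c + 1)))
    let vertical := (PySem.List.pyRange 0 (n - cols)).map (fun i => (i, i + cols))
    PySem.List.sorted (horizontal ++ vertical) (fun p => p.1 * n + p.2) false
  else []  -- ValueError in Python: excluded by Pre_

-- ===== PRECONDITION & SPEC =====
-- Pre_: exactly where Python A returns (no ValueError): a two-element list of positive ints.
def Pre_get_nearest_neighbor_interactions (lattice_size : List Int) : Prop :=
  lattice_size.length = 2 ∧ 0 < lattice_size.getD 0 0 ∧ 0 < lattice_size.getD 1 0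
instance (lattice_size : List Int) : Decidable (Pre_get_nearest_neighbor_interactions lattice_size) := by
  unfold Pre_get_nearest_neighbor_interactions; infer_instance
def pvWitness_get_nearest_neighbor_interactions : List Int := [2, 3]

def Spec_get_nearest_neighbor_interactions (lattice_size : List Int) (out : List (Int × Int)) : Prop := out = get_nearest_neighbor_interactions_alt lattice_size
instance (lattice_size : List Int) (out : List (Int × Int)) : Decidable (Spec_get_nearest_neighbor_interactions lattice_size out) := by unfold Spec_get_nearest_neighbor_interactions; infer_instance

-- ===== CLAIM (what is proved, stated in full; the proofs are below) =====
def Claim_equal_get_nearest_neighbor_interactions : Prop := ∀ (lattice_size : List Int), Dom_get_nearest_neighbor_interactions lattice_size → Pre_get_nearest_neighbor_interactions lattice_size → Spec_get_nearest_neighbor_interactions lattice_size (get_nearest_neighbor_interactions lattice_size)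

-- ===== LEMMAS AND PROOFS =====

-- A fold that conditionally appends two singletons is a flatMap.
theorem foldl_two_if {α : Type} (p q : Int → Prop) [DecidablePred p] [DecidablePred q]
    (f g : Int → α) (l : List Int) (acc : List α) :
    l.foldl (fun acc i =>
        let acc1 := if p i then acc ++ [f i] else acc
        if q i then acc1 ++ [g i] else acc1) acc
      = acc ++ l.flatMap (fun i => (if p i then [f i] else []) ++ (if q i then [g i] else [])) := by
  rw [← PySem.List.foldl_append_eq_flatMap]
  apply PySem.List.foldl_congr_mem
  intro acc x _
  by_cases hp : p x <;> by_cases hq : q x <;> simp [hp, hq]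

theorem flatMap_single {α β : Type} (l : List α) (f : α → β) :
    (l.flatMap fun x => [f x]) = l.map f := by
  induction l with
  | nil => rfl
  | cons a t ih => simp [List.flatMap_cons, ih]

theorem flatMap_if_of_mem {α : Type} (l : List Int) (p : Int → Prop) [DecidablePred p]
    (f : Int → α) (h : ∀ x ∈ l, p x) :
    (l.flatMap fun x => if p x then [f x] else []) = l.map f := by
  rw [← flatMap_single l f]
  apply List.flatMap_congr
  intro x hx
  simp [h x hx]

-- a conditional-singleton flatMap over range(n) with condition 'i < m' is map over range(m)
theorem chain_prefix {α : Type} (m n : Int) (f : Int → α) (h0 : 0 ≤ m) (h : m ≤ n) :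
    ((PySem.List.pyRange 0 n).flatMap fun i => if i < m then [f i] else [])
      = (PySem.List.pyRange 0 m).map f := by
  rw [PySem.List.pyRange_one_append 0 m n h0 h, List.flatMap_append]
  have h1 : ((PySem.List.pyRange 0 m).flatMap fun i => if i < m then [f i] else [])
      = (PySem.List.pyRange 0 m).map f := by
    apply flatMap_if_of_mem
    intro x hx
    exact (PySem.List.mem_pyRange_one.mp hx).2
  have h2 : ((PySem.List.pyRange m n).flatMap fun i => if i < m then [f i] else []) = [] := by
    rw [List.flatMap_congr (g := fun _ => ([] : List α)) ?_]
    · simp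
    · intro x hx
      have := (PySem.List.mem_pyRange_one.mp hx).1
      simp [not_lt.mpr this]
  rw [h1, h2, List.append_nil]

-- shift a range
theorem pyRange_shift (s n : Int) :
    PySem.List.pyRange s (s + n) = (PySem.List.pyRange 0 n).map (fun c => s + c) := by
  rw [PySem.List.pyRange_one, PySem.List.pyRange_one, List.map_map]
  have : s + n - s = n - 0 := by ring
  rw [this]
  simp [Function.comp]

-- block decomposition of range (R*C) into R blocks of C
theorem range_mul_flatMap {α : Type} (R : Nat) (C : Int) (hC : 0 ≤ C) (f : Int → List α) :
    ((PySem.List.pyRange 0 ((R : Int) * C)).flatMap f)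
      = (PySem.List.pyRange 0 (R : Int)).flatMap
          (fun r => (PySem.List.pyRange 0 C).flatMap (fun c => f (r * C + c))) := by
  induction R with
  | zero => simp [PySem.List.pyRange_one_eq_nil]
  | succ R ih =>
    have h1 : PySem.List.pyRange 0 (((R : Int) + 1) * C)
        = PySem.List.pyRange 0 ((R : Int) * C) ++ PySem.List.pyRange ((R : Int) * C) ((R : Int) * C + C) := by
      have := PySem.List.pyRange_one_append 0 ((R : Int) * C) ((R : Int) * C + C)
        (by positivity) (by omega)
      rw [← this]; ring_nf
    have h2 : PySem.List.pyRange 0 ((R : Int) + 1)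
        = PySem.List.pyRange 0 (R : Int) ++ [(R : Int)] :=
      PySem.List.pyRange_one_succ_right (by positivity)
    push_cast
    rw [h1, h2, List.flatMap_append, List.flatMap_append, ih,
        pyRange_shift ((R : Int) * C) C, List.flatMap_map]
    simp

-- (i+1) % cols ≠ 0 at i = r*cols + c  ⟺  c < cols - 1  (for 0 ≤ c < cols, cols > 0)
theorem right_iff (cols r c : Int) (hcols : 0 < cols) (hc0 : 0 ≤ c) (hc : c < cols) :
    (PySem.Int.mod (r * cols + c + 1) cols ≠ 0) ↔ c < cols - 1 := by
  rw [PySem.Int.mod_eq_emod_of_pos hcols]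
  have : r * cols + c + 1 = (c + 1) + cols * r := by ring
  rw [this, Int.add_mul_emod_self_left]
  constructor
  · intro h
    by_contra hcon
    have : c = cols - 1 := by omega
    subst this
    simp at h
  · intro h
    rw [Int.emod_eq_of_lt (by omega) (by omega)]
    omega

-- splitting an interleaved flatMap into its two staged flatMaps is a permutation
theorem perm_flatMap_append {α β : Type} (l : List α) (f g : α → List β) :
    (l.flatMap fun x => f x ++ g x).Perm (l.flatMap f ++ l.flatMap g) := by
  induction l with
  | nil => simp
  | cons a t ih =>
    simp only [List.flatMap_cons]
    refine (List.Perm.append_left _ ih).trans ?_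
    have h : ((g a ++ t.flatMap f) ++ t.flatMap g).Perm ((t.flatMap f ++ g a) ++ t.flatMap g) :=
      List.Perm.append_right _ List.perm_append_comm
    have h2 := List.Perm.append_left (f a) h
    simpa [List.append_assoc] using h2

-- map of a strictly key-increasing function over a range is key-strictly-increasing
theorem pairwise_map_range {α : Type} (n : Int) (f : Int → α) (key : α → Int)
    (h : ∀ i j : Int, 0 ≤ i → i < j → j < n → key (f i) < key (f j)) :
    ((PySem.List.pyRange 0 n).map f).Pairwise (fun a b => key a < key b) := by
  rw [List.pairwise_map]
  have hp := PySem.List.pairwise_lt_pyRange_one (a := 0) (b := n)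
  refine List.Pairwise.imp_of_mem ?_ hp
  intro i j hi hj hij
  have h1 := PySem.List.mem_pyRange_one.mp hi
  have h2 := PySem.List.mem_pyRange_one.mp hj
  exact h i j h1.1 hij h2.2


-- membership in one interleaved block of A's 2D loop gives the key bounds
theorem block_mem_bounds (n cols i : Int) (hcols : 0 < cols) (_hi0 : 0 ≤ i) (hin : i < n)
    (x : Int × Int)
    (hx : x ∈ ((if PySem.Int.mod (i + 1) cols ≠ 0 then [(i, i + 1)] else [])
        ++ (if i + cols < n then [(i, i + cols)] else []))) :
    x.1 = i ∧ i < x.2 ∧ x.2 ≤ n := by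
  rcases List.mem_append.mp hx with h | h
  · by_cases hc : PySem.Int.mod (i + 1) cols ≠ 0
    · rw [if_pos hc] at h
      simp at h
      subst h
      refine ⟨rfl, by omega, by omega⟩
    · rw [if_neg hc] at h
      simp at h
  · by_cases hc : i + cols < n
    · rw [if_pos hc] at h
      simp at h
      subst h
      refine ⟨rfl, by omega, by omega⟩
    · rw [if_neg hc] at h
      simp at h

-- ===== VERDICT (by name: the statement is the Claim_ definition above) =====
theorem get_nearest_neighbor_interactions_spec : Claim_equal_get_nearest_neighbor_interactions := by
  intro lattice_size _hdom hpre
  obtain ⟨hlen, h0, h1⟩ := hpre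
  match lattice_size, hlen with
  | [rows, cols], _ =>
  simp only [List.getD] at h0 h1
  simp at h0 h1
  unfold Spec_get_nearest_neighbor_interactions
  have hB : get_nearest_neighbor_interactions_alt [rows, cols]
      = PySem.List.sorted
          (((PySem.List.pyRange 0 rows).flatMap (fun r =>
              (PySem.List.pyRange 0 (cols - 1)).map
                (fun c => (r * cols + c, r * cols + c + 1))))
            ++ ((PySem.List.pyRange 0 (rows * cols - cols)).map (fun i => (i, i + cols))))
          (fun p => p.1 * (rows * cols) + p.2) false := by
    show (if ([rows, cols] : List Int).length = 2 then _ else _) = _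
    rw [if_pos (by simp)]
    rfl
  rw [hB]
  symm
  by_cases h1d : rows = 1 ∨ cols = 1
  · -- 1D branches of A: the two staged lists concatenate to exactly A's chain
    have hA : get_nearest_neighbor_interactions [rows, cols]
        = (PySem.List.pyRange 0 (rows * cols - 1)).map (fun i => (i, i + 1)) := by
      simp only [get_nearest_neighbor_interactions]
      rw [if_pos h1d]
    rw [hA]
    apply PySem.List.sorted_eq_of_perm_of_pairwise_lt
    · -- permutation (in fact equality)
      have heq : ((PySem.List.pyRange 0 rows).flatMap (fun r =>
              (PySem.List.pyRange 0 (cols - 1)).map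
                (fun c => (r * cols + c, r * cols + c + 1))))
            ++ ((PySem.List.pyRange 0 (rows * cols - cols)).map (fun i => (i, i + cols)))
          = (PySem.List.pyRange 0 (rows * cols - 1)).map (fun i => (i, i + 1)) := by
        rcases h1d with hr | hc
        · subst hr
          have hr1 : PySem.List.pyRange 0 (1 : Int) = [0] := by
            have := PySem.List.pyRange_one_singleton (0 : Int)
            simpa using this
          rw [hr1]
          simp only [List.flatMap_cons, List.flatMap_nil, List.append_nil]
          have hv : ((1 : Int) * cols - cols) = 0 := by ring
          rw [hv, PySem.List.pyRange_one_eq_nil (a := (0:Int)) (b := (0:Int)) (by omega)]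
          simp only [List.map_nil, List.append_nil]
          have h1c : (1 : Int) * cols - 1 = cols - 1 := by ring
          rw [h1c]
          apply List.map_congr_left
          intro c _
          norm_num
        · subst hc
          have hH : ((PySem.List.pyRange 0 rows).flatMap (fun r =>
              (PySem.List.pyRange 0 ((1 : Int) - 1)).map
                (fun c => (r * 1 + c, r * 1 + c + 1)))) = [] := by
            rw [List.flatMap_congr (g := fun _ => ([] : List (Int × Int))) ?_]
            · simp
            · intro r _
              rw [show ((1 : Int) - 1) = 0 by ring, PySem.List.pyRange_one_eq_nil (by omega)]
              simp
          rw [hH, List.nil_append]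
      rw [heq]
    · -- strictly increasing key along A's chain
      apply pairwise_map_range
      intro i j hi hij hj
      have hn : 1 ≤ rows * cols := by nlinarith
      have hij' : i * (rows * cols) ≤ j * (rows * cols) :=
        mul_le_mul_of_nonneg_right (le_of_lt hij) (by omega)
      simp only []
      linarith
  · -- 2D branch of A
    have h2r : 2 ≤ rows := by omega
    have h2c : 2 ≤ cols := by omega
    have hcn : cols ≤ rows * cols := by nlinarith
    have hA : get_nearest_neighbor_interactions [rows, cols]
        = (PySem.List.pyRange 0 (rows * cols)).flatMap (fun i =>
            (if PySem.Int.mod (i + 1) cols ≠ 0 then [(i, i + 1)] else [])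
              ++ (if i + cols < rows * cols then [(i, i + cols)] else [])) := by
      simp only [get_nearest_neighbor_interactions]
      rw [if_neg h1d]
      refine Eq.trans (foldl_two_if (fun i => PySem.Int.mod (i + 1) cols ≠ 0)
        (fun i => i + cols < rows * cols)
        (fun i => (i, i + 1)) (fun i => (i, i + cols)) _ []) ?_
      rw [List.nil_append]
    rw [hA]
    apply PySem.List.sorted_eq_of_perm_of_pairwise_lt
    · -- permutation: split the interleaved blocks into the two staged lists
      have hR : ((PySem.List.pyRange 0 (rows * cols)).flatMap fun i =>
            if PySem.Int.mod (i + 1) cols ≠ 0 then [(i, i + 1)] else [])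
          = (PySem.List.pyRange 0 rows).flatMap (fun r =>
              (PySem.List.pyRange 0 (cols - 1)).map
                (fun c => (r * cols + c, r * cols + c + 1))) := by
        have hRc : rows = ((rows.toNat : Nat) : Int) := by omega
        rw [hRc, range_mul_flatMap rows.toNat cols (by omega), ← hRc]
        apply List.flatMap_congr
        intro r _
        have hcond : ∀ c ∈ PySem.List.pyRange 0 cols,
            (if PySem.Int.mod (r * cols + c + 1) cols ≠ 0
              then [(r * cols + c, r * cols + c + 1)] else [])
            = (if c < cols - 1 then [(r * cols + c, r * cols + c + 1)] else []) := by
          intro c hc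
          obtain ⟨hc0, hcC⟩ := PySem.List.mem_pyRange_one.mp hc
          rw [if_congr (right_iff cols r c (by omega) hc0 hcC) rfl rfl]
        rw [List.flatMap_congr hcond,
            chain_prefix (cols - 1) cols _ (by omega) (by omega)]
      have hD : ((PySem.List.pyRange 0 (rows * cols)).flatMap fun i =>
            if i + cols < rows * cols then [(i, i + cols)] else [])
          = (PySem.List.pyRange 0 (rows * cols - cols)).map (fun i => (i, i + cols)) := by
        have hcond : ∀ i ∈ PySem.List.pyRange 0 (rows * cols),
            (if i + cols < rows * cols then [(i, i + cols)] else [])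
            = (if i < rows * cols - cols then [(i, i + cols)] else []) := by
          intro i _
          rw [if_congr (show (i + cols < rows * cols) ↔ (i < rows * cols - cols) by omega) rfl rfl]
        rw [List.flatMap_congr hcond,
            chain_prefix (rows * cols - cols) (rows * cols) _ (by omega) (by omega)]
      rw [← hR, ← hD]
      exact perm_flatMap_append _ _ _
    · -- strictly increasing key along A's 2D output
      rw [List.flatMap_def, List.pairwise_flatten]
      refine ⟨?_, ?_⟩
      · intro l hl
        rcases List.mem_map.mp hl with ⟨i, _, rfl⟩
        by_cases hp : PySem.Int.mod (i + 1) cols ≠ 0 <;>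
          by_cases hq : i + cols < rows * cols <;>
            · simp [hp, hq]
              try nlinarith
      · rw [List.pairwise_map]
        refine List.Pairwise.imp_of_mem ?_
          (PySem.List.pairwise_lt_pyRange_one (a := 0) (b := rows * cols))
        intro i j hi hj hij x hx y hy
        obtain ⟨hi0, hin⟩ := PySem.List.mem_pyRange_one.mp hi
        obtain ⟨hj0, hjn⟩ := PySem.List.mem_pyRange_one.mp hj
        obtain ⟨hx1, hx2, hx3⟩ := block_mem_bounds (rows * cols) cols i (by omega) hi0 hin x hx
        obtain ⟨hy1, hy2, _⟩ := block_mem_bounds (rows * cols) cols j (by omega) hj0 hjn y hy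
        have hmul : (i + 1) * (rows * cols) ≤ j * (rows * cols) :=
          mul_le_mul_of_nonneg_right (by omega) (by nlinarith)
        rw [hx1, hy1]
        nlinarith
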